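-- pv_equiv track=rewrite | github.com/AvidityLabs/nexia | app/api/utilities/validators/text_validator.py | validate_text_input
-- ===== SOURCE A (Python) =====
-- def validate_text_input(text, min_length=1, max_length=2048):
--     if text=="":
--           return False, "Text cannot be empty"
--     if not text:
--         return False, "Text cannot be empty"
--     elif text.isspace():
--         return False, "Text cannot contain only spaces"
--     elif len(text) > max_length:
--         return False, "Text is too long"
--     elif len(text) < min_length:
--         return False, "Text is too short"
--     elif text.isdigit():
--         return False, "Text cannot contain only digits"
--     elif all(char in "!@#$%^&*()_+-=[]{}\\|;:'\",.<>/?`~" for char in text):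
--         return False, "Text cannot contain only special characters"
--     elif not all(ord(char) < 128 for char in text):
--         return False, "Text cannot contain non-ASCII characters"
--     else:
--         return True, ""
-- ===== SOURCE B (Python) =====
-- _SPECIALS = "!@#$%^&*()_+-=[]{}\\|;:'\",.<>/?`~"
--
-- def validate_text_input(text, min_length=1, max_length=2048):
--     # One pass over the characters computes all content flags at once,
--     # then a flat decision chain (same order of messages as the original).
--     if text == "":
--         return False, "Text cannot be empty"
--     all_space = all_digit = all_special = all_ascii = True
--     for ch in text:
--         all_space = all_space and ch.isspace()
--         all_digit = all_digit and ch.isdigit()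
--         all_special = all_special and (ch in _SPECIALS)
--         all_ascii = all_ascii and ord(ch) < 128
--     if all_space:
--         return False, "Text cannot contain only spaces"
--     if len(text) > max_length:
--         return False, "Text is too long"
--     if len(text) < min_length:
--         return False, "Text is too short"
--     if all_digit:
--         return False, "Text cannot contain only digits"
--     if all_special:
--         return False, "Text cannot contain only special characters"
--     if not all_ascii:
--         return False, "Text cannot contain non-ASCII characters"
--     return True, ""
-- ===== Notes on version B (the rewrite author's own statement) =====
-- stated objective: alternative
-- what changed: Replaces A's elif chain of separate whole-string scans (isspace, isdigit, two all(...) comprehensions) with a single pass over the characters that accumulates all four content flags at once, followed by a flat decision chain in the same message order.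
import Mathlib
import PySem

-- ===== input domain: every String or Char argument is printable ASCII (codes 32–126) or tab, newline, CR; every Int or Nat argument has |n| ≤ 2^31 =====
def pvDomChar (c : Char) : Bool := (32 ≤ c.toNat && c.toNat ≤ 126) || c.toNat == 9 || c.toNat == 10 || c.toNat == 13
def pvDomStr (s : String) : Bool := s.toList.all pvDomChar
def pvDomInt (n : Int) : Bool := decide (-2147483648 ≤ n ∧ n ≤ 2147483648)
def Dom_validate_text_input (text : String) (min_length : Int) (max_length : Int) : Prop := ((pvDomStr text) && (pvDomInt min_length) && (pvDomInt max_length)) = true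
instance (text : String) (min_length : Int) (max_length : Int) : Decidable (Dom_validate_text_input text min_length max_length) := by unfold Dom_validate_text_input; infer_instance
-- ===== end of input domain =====

-- B replaces A's chain of separate whole-string scans (isspace/isdigit/all(...)/all(...))
-- by ONE pass over the characters that accumulates all four content flags, then a flat
-- decision chain in the same message order (objective: alternative decomposition).

-- ===== PORT A =====
def pvSpecials : List Char := "!@#$%^&*()_+-=[]{}\\|;:'\",.<>/?`~".toList

def validate_text_input (text : String) (min_length : Int) (max_length : Int) : Bool × String :=
  if text = "" then (false, "Text cannot be empty")
  else if text = "" then (false, "Text cannot be empty")   -- 'not text' on a str is text == ""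
  else if PySem.Str.strIsspace text then (false, "Text cannot contain only spaces")
  else if (PySem.Str.len text : Int) > max_length then (false, "Text is too long")
  else if (PySem.Str.len text : Int) < min_length then (false, "Text is too short")
  else if PySem.Str.strIsdigit text then (false, "Text cannot contain only digits")
  else if text.toList.all (fun c => pvSpecials.contains c) then (false, "Text cannot contain only special characters")
  else if !(text.toList.all (fun c => c.toNat < 128)) then (false, "Text cannot contain non-ASCII characters")
  else (true, "")

-- ===== PORT B =====
def pvStep (f : Bool × Bool × Bool × Bool) (c : Char) : Bool × Bool × Bool × Bool :=
  (f.1 && PySem.Chars.isspace c,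
   f.2.1 && PySem.Chars.isdigit c,
   f.2.2.1 && pvSpecials.contains c,
   f.2.2.2 && decide (c.toNat < 128))

def validate_text_input_alt (text : String) (min_length : Int) (max_length : Int) : Bool × String :=
  if text = "" then (false, "Text cannot be empty")
  else
    let f := text.toList.foldl pvStep (true, true, true, true)
    if f.1 then (false, "Text cannot contain only spaces")
    else if ((text.toList.length : Int)) > max_length then (false, "Text is too long")
    else if ((text.toList.length : Int)) < min_length then (false, "Text is too short")
    else if f.2.1 then (false, "Text cannot contain only digits")
    else if f.2.2.1 then (false, "Text cannot contain only special characters")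
    else if !f.2.2.2 then (false, "Text cannot contain non-ASCII characters")
    else (true, "")

-- ===== PRECONDITION & SPEC =====
def Spec_validate_text_input (text : String) (min_length : Int) (max_length : Int) (out : Bool × String) : Prop := out = validate_text_input_alt text min_length max_length
instance (text : String) (min_length : Int) (max_length : Int) (out : Bool × String) : Decidable (Spec_validate_text_input text min_length max_length out) := by unfold Spec_validate_text_input; infer_instance

-- ===== CLAIM (what is proved, stated in full; the proofs are below) =====
def Claim_equal_validate_text_input : Prop := ∀ (text : String) (min_length : Int) (max_length : Int), Dom_validate_text_input text min_length max_length → Spec_validate_text_input text min_length max_length (validate_text_input text min_length max_length)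

-- ===== LEMMAS AND PROOFS =====

/-- The one-pass flag fold computes the four `all` predicates. -/
theorem pvStep_foldl (cs : List Char) (a b c d : Bool) :
    cs.foldl pvStep (a, b, c, d) =
      (a && cs.all PySem.Chars.isspace,
       b && cs.all PySem.Chars.isdigit,
       c && cs.all (fun ch => pvSpecials.contains ch),
       d && cs.all (fun ch => decide (ch.toNat < 128))) := by
  induction cs generalizing a b c d with
  | nil => simp
  | cons x xs ih => simp [pvStep, ih, Bool.and_assoc]

theorem pvToList_ne_nil (s : String) (h : s ≠ "") : s.toList ≠ [] := by
  intro hl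
  exact h (String.toList_eq_nil_iff.mp hl)

-- ===== VERDICT (by name: the statement is the Claim_ definition above) =====
theorem validate_text_input_spec : Claim_equal_validate_text_input := by
  intro text min_length max_length _
  unfold Spec_validate_text_input validate_text_input validate_text_input_alt
  by_cases h : text = ""
  · simp [h]
  · have hnil : text.toList ≠ [] := pvToList_ne_nil text h
    have hf : text.toList.isEmpty = false := by simp [hnil]
    simp only [h, if_false, pvStep_foldl, PySem.Str.strIsspace_eq, PySem.Str.strIsdigit_eq,
      PySem.Chars.strIsspace, PySem.Chars.strIsdigit, PySem.Str.len_eq, hf,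
      Bool.not_false, Bool.true_and]
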